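-- pv_equiv track=rewrite | github.com/BenGriffith/pybites | 347/script.py | get_hand_for_word
-- ===== SOURCE A (Python) =====
-- from enum import Enum
--
-- class Hand(str, Enum):
--     RIGHT = "right"
--     LEFT = "left"
--     BOTH = "both"
--
-- LEFT_HAND_CHARS = set("QWERTASDFGZXCVB")
--
-- RIGHT_HAND_CHARS = set("YUIOPHJKLNM")
--
-- def get_hand_for_word(word: str) -> Hand:
--     """
--     Use the LEFT_HAND_CHARS and RIGHT_HAND_CHARS sets to determine
--     if the passed in word can be written with only the left or right
--     hand, or if both hands are needed.
--     """
--
--     left_hand, right_hand = False, False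
--
--     for char in word:
--         char = char.upper()
--         if char in LEFT_HAND_CHARS:
--             left_hand = True
--
--         if char in RIGHT_HAND_CHARS:
--             right_hand = True
--
--     if left_hand and right_hand:
--         return Hand.BOTH
--
--     if left_hand:
--         return Hand.LEFT
--
--     if right_hand:
--         return Hand.RIGHT
-- ===== SOURCE B (Python) =====
-- from enum import Enum
--
-- class Hand(str, Enum):
--     RIGHT = "right"
--     LEFT = "left"
--     BOTH = "both"
--
-- LEFT_HAND_CHARS = set("QWERTASDFGZXCVB")
--
-- RIGHT_HAND_CHARS = set("YUIOPHJKLNM")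
--
-- def get_hand_for_word(word: str) -> Hand:
--     # Reverse the traversal: instead of scanning the word and uppercasing each
--     # character, probe the word (substring tests) with each of the 26 hand
--     # characters in both cases.  The word itself is never transformed.
--     left = any(c in word or c.lower() in word for c in LEFT_HAND_CHARS)
--     right = any(c in word or c.lower() in word for c in RIGHT_HAND_CHARS)
--     if left and right:
--         return Hand.BOTH
--     if left:
--         return Hand.LEFT
--     if right:
--         return Hand.RIGHT
-- ===== Notes on version B (the rewrite author's own statement) =====
-- stated objective: alternative
-- what changed: Reverses the traversal: instead of scanning the word and uppercasing each character against the two sets, B probes the untouched word with substring membership tests for each hand character in upper and lower case; Pre_ excludes words containing no hand character, on which A (and B) fall through returning None rather than a Hand string.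
-- outside the precondition, e.g. on get_hand_for_word('123'): A returns None, B returns None
import Mathlib
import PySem

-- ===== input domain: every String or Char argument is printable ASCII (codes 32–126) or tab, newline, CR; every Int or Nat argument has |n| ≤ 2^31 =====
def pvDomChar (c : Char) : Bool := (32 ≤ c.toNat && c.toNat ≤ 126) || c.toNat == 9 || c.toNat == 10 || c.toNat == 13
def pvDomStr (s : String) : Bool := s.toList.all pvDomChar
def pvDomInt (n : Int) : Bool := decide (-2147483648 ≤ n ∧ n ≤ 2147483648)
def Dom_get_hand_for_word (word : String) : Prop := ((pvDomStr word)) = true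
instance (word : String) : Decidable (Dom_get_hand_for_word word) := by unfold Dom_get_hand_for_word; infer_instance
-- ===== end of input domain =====

-- B reverses the traversal: instead of scanning the word and uppercasing each
-- character, it probes the untouched word with substring tests for each hand
-- character in both cases (objective: alternative).

-- ===== PORT A =====
-- LEFT_HAND_CHARS = set("QWERTASDFGZXCVB")
def pvLeftChars : PySem.Set Char := PySem.Set.ofList "QWERTASDFGZXCVB".toList
-- RIGHT_HAND_CHARS = set("YUIOPHJKLNM")
def pvRightChars : PySem.Set Char := PySem.Set.ofList "YUIOPHJKLNM".toList

-- Port of A: the flag-setting loop over the word's characters, then the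
-- return cascade.  On the ASCII domain char.upper() is Char.toUpper.
-- A falls through returning None when neither flag is set; that input is
-- outside Pre_ (None is not a str), the port returns "" there.
def get_hand_for_word (word : String) : String :=
  let fr := word.toList.foldl
    (fun (s : Bool × Bool) ch =>
      let c := ch.toUpper
      let s := if PySem.Set.contains pvLeftChars c then (true, s.2) else s
      if PySem.Set.contains pvRightChars c then (s.1, true) else s)
    (false, false)
  if fr.1 && fr.2 then "both"
  else if fr.1 then "left"
  else if fr.2 then "right"
  else ""

-- ===== PORT B =====
-- left = any(c in word or c.lower() in word for c in LEFT_HAND_CHARS)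
-- (any over a set: order-independent; 'c in word' is Str.isIn, c.lower() is
-- Char.toLower, exact on ASCII). Same None fall-through, "" outside Pre_.
def get_hand_for_word_alt (word : String) : String :=
  let probe := fun (c : Char) =>
    PySem.Str.isIn (String.ofList [c]) word || PySem.Str.isIn (String.ofList [c.toLower]) word
  let left : Bool := pvLeftChars.any probe
  let right : Bool := pvRightChars.any probe
  if left && right then "both"
  else if left then "left"
  else if right then "right"
  else ""

-- ===== PRECONDITION & SPEC =====
-- Pre_ excludes words with no left- or right-hand character: there the Python
-- function falls through and returns None, which is not a value of the
-- declared str/Hand type.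
def Pre_get_hand_for_word (word : String) : Prop :=
  (word.toList.any (fun c =>
    PySem.Set.contains pvLeftChars c.toUpper || PySem.Set.contains pvRightChars c.toUpper)) = true
instance (word : String) : Decidable (Pre_get_hand_for_word word) := by
  unfold Pre_get_hand_for_word; infer_instance

def pvWitness_get_hand_for_word : String := "Taxi"

def Spec_get_hand_for_word (word : String) (out : String) : Prop := out = get_hand_for_word_alt word
instance (word : String) (out : String) : Decidable (Spec_get_hand_for_word word out) := by unfold Spec_get_hand_for_word; infer_instance

-- ===== CLAIM (what is proved, stated in full; the proofs are below) =====
def Claim_equal_get_hand_for_word : Prop := ∀ (word : String), Dom_get_hand_for_word word → Pre_get_hand_for_word word → Spec_get_hand_for_word word (get_hand_for_word word)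

-- ===== LEMMAS AND PROOFS =====

-- A's loop computes, componentwise, "some character's upper is a left/right char".
theorem pv_foldA (l : List Char) (a b : Bool) :
    l.foldl
      (fun (s : Bool × Bool) ch =>
        let c := ch.toUpper
        let s := if PySem.Set.contains pvLeftChars c then (true, s.2) else s
        if PySem.Set.contains pvRightChars c then (s.1, true) else s)
      (a, b)
    = (a || l.any (fun c => PySem.Set.contains pvLeftChars c.toUpper),
       b || l.any (fun c => PySem.Set.contains pvRightChars c.toUpper)) := by
  induction l generalizing a b with
  | nil => simp
  | cons x xs ih =>
    have hstep : (let c := x.toUpper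
        let s := if PySem.Set.contains pvLeftChars c then (true, ((a, b) : Bool × Bool).2) else (a, b)
        if PySem.Set.contains pvRightChars c then (s.1, true) else s)
        = ((a || PySem.Set.contains pvLeftChars x.toUpper,
            b || PySem.Set.contains pvRightChars x.toUpper) : Bool × Bool) := by
      cases hL : PySem.Set.contains pvLeftChars x.toUpper <;>
        cases hR : PySem.Set.contains pvRightChars x.toUpper <;>
          simp only [hL, hR] <;> simp
    rw [List.foldl_cons, hstep, ih, List.any_cons, List.any_cons]
    simp [Bool.or_assoc]

-- On every ASCII character, "equal to c or to c's lowercase, for some hand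
-- char c" is "its uppercase is a hand char" — checked once for all 127 codes.
theorem pv_ascii_table : ∀ n ∈ List.range 127,
    ((pvLeftChars.any fun c => Char.ofNat n == c || Char.ofNat n == c.toLower)
        = PySem.Set.contains pvLeftChars (Char.ofNat n).toUpper)
    ∧ ((pvRightChars.any fun c => Char.ofNat n == c || Char.ofNat n == c.toLower)
        = PySem.Set.contains pvRightChars (Char.ofNat n).toUpper) := by
  set_option maxRecDepth 4000 in decide

theorem pv_char (ch : Char) (h : pvDomChar ch = true) :
    ((pvLeftChars.any fun c => ch == c || ch == c.toLower)
        = PySem.Set.contains pvLeftChars ch.toUpper)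
    ∧ ((pvRightChars.any fun c => ch == c || ch == c.toLower)
        = PySem.Set.contains pvRightChars ch.toUpper) := by
  have hn : ch.toNat ∈ List.range 127 := by
    simp only [pvDomChar, Bool.or_eq_true, Bool.and_eq_true, decide_eq_true_eq, beq_iff_eq] at h
    simp only [List.mem_range]
    omega
  have := pv_ascii_table ch.toNat hn
  rwa [Char.ofNat_toNat] at this

-- B's reversed probe equals A's per-character test, for either hand set.
theorem pv_probe_eq (word : String) (hw : pvDomStr word = true) (S : PySem.Set Char)
    (hS : ∀ ch : Char, pvDomChar ch = true →
      (S.any fun c => ch == c || ch == c.toLower) = PySem.Set.contains S ch.toUpper) :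
    (S.any fun c =>
      PySem.Str.isIn (String.ofList [c]) word || PySem.Str.isIn (String.ofList [c.toLower]) word)
    = word.toList.any (fun ch => PySem.Set.contains S ch.toUpper) := by
  rw [Bool.eq_iff_iff]
  simp only [List.any_eq_true, Bool.or_eq_true, PySem.Str.isIn_iff_infix, String.toList_ofList,
    List.singleton_infix_iff]
  constructor
  · rintro ⟨c, hc, hmem⟩
    rcases hmem with hm | hm
    · refine ⟨c, hm, ?_⟩
      have := hS c ?_
      · rw [← this]
        simp only [List.any_eq_true, Bool.or_eq_true, beq_iff_eq]
        exact ⟨c, hc, Or.inl rfl⟩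
      · exact List.all_eq_true.1 hw c hm
    · refine ⟨c.toLower, hm, ?_⟩
      have := hS c.toLower ?_
      · rw [← this]
        simp only [List.any_eq_true, Bool.or_eq_true, beq_iff_eq]
        exact ⟨c, hc, Or.inr rfl⟩
      · exact List.all_eq_true.1 hw _ hm
  · rintro ⟨ch, hch, hup⟩
    have := hS ch (List.all_eq_true.1 hw ch hch)
    rw [← this] at hup
    simp only [List.any_eq_true, Bool.or_eq_true, beq_iff_eq] at hup
    obtain ⟨c, hc, hq⟩ := hup
    refine ⟨c, hc, ?_⟩
    rcases hq with rfl | rfl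
    · exact Or.inl hch
    · exact Or.inr hch

-- ===== VERDICT (by name: the statement is the Claim_ definition above) =====
theorem get_hand_for_word_spec : Claim_equal_get_hand_for_word := by
  intro word hd _
  unfold Spec_get_hand_for_word get_hand_for_word get_hand_for_word_alt
  simp only [pv_probe_eq word hd pvLeftChars (fun ch h => (pv_char ch h).1),
      pv_probe_eq word hd pvRightChars (fun ch h => (pv_char ch h).2),
      pv_foldA, Bool.false_or]
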